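-- pv_equiv track=rewrite | github.com/NeuroDataDesign/avatr | source/bvarjavand/scraper/scraper.py | sort_data_links
-- ===== SOURCE A (Python) =====
-- def sort_data_links(data_links):
--     datasets = []
--     dataset={}
--     for link in data_links:
--         if 's3' not in link['link'] and 'git' not in link['link']:
--             datasets.append(dataset)
--             dataset = {}
--         dataset[link['name']] = link['link']
--     return datasets[1:]
-- ===== SOURCE B (Python) =====
-- def sort_data_links(data_links):
--     # indices of separator links (neither 's3' nor 'git' in the url)
--     seps = [i for i, link in enumerate(data_links)
--             if 's3' not in link['link'] and 'git' not in link['link']]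
--     # one dataset per pair of consecutive separators
--     return [{l['name']: l['link'] for l in data_links[a:b]}
--             for a, b in zip(seps, seps[1:])]
-- ===== Notes on version B (the rewrite author's own statement) =====
-- stated objective: simpler
-- what changed: B replaces A's single stateful loop (running dict, append-then-drop-first) by a two-phase decomposition: collect the separator indices, then build one dict comprehension per pair of consecutive separator indices over the corresponding slice.
import Mathlib
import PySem

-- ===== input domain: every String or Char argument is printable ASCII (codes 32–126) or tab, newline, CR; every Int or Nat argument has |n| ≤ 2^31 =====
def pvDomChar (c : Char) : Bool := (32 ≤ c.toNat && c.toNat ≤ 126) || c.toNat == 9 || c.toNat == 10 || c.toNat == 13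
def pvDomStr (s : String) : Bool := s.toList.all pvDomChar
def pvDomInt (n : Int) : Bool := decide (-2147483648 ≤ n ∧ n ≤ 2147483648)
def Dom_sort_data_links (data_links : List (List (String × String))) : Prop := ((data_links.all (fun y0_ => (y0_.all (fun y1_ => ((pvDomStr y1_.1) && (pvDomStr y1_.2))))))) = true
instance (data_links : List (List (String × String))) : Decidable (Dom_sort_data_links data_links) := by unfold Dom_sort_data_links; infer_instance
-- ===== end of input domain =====

-- B groups the links by separator positions instead of A's running-dict loop: it first
-- collects the separator indices, then builds one dict per pair of consecutive separators
-- (same output; objective: simpler, no speed claim).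

-- shared helpers: the two dict accesses and the separator test both Pythons perform
def pvLk (link : List (String × String)) : String := PySem.Dict.getD ⟨link⟩ "link" ""
def pvNm (link : List (String × String)) : String := PySem.Dict.getD ⟨link⟩ "name" ""
def pvIsSep (link : List (String × String)) : Bool :=
  !(PySem.Str.isIn "s3" (pvLk link)) && !(PySem.Str.isIn "git" (pvLk link))
-- dataset[link['name']] = link['link']
def pvIns (d : List (String × String)) (link : List (String × String)) : List (String × String) :=
  (PySem.Dict.insert ⟨d⟩ (pvNm link) (pvLk link)).items

-- ===== PORT A =====
def sort_data_links (data_links : List (List (String × String))) : List (List (String × String)) :=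
  PySem.List.slice
    (data_links.foldl
      (fun (st : List (List (String × String)) × List (String × String)) link =>
        if pvIsSep link then (st.1 ++ [st.2], pvIns [] link) else (st.1, pvIns st.2 link))
      ([], [])).1
    (some 1) none

-- ===== PORT B =====
-- seps = [i for i, link in enumerate(data_links) if <link is a separator>]
def pvSepIdx (data_links : List (List (String × String))) : List Int :=
  ((PySem.List.enumerate data_links).filter (fun p => pvIsSep p.2)).map (·.1)

def sort_data_links_alt (data_links : List (List (String × String))) : List (List (String × String)) :=
  ((pvSepIdx data_links).zip (PySem.List.slice (pvSepIdx data_links) (some 1) none)).map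
    (fun ab => (PySem.List.slice data_links (some ab.1) (some ab.2)).foldl pvIns [])

-- ===== PRECONDITION & SPEC =====
-- Pre_ excludes exactly the inputs on which the Python A raises KeyError: some link dict
-- lacks the 'link' or 'name' key.
def Pre_sort_data_links (data_links : List (List (String × String))) : Prop :=
  ∀ link ∈ data_links,
    PySem.Dict.contains (⟨link⟩ : PySem.Dict String String) "link" = true ∧
    PySem.Dict.contains (⟨link⟩ : PySem.Dict String String) "name" = true
instance (data_links : List (List (String × String))) : Decidable (Pre_sort_data_links data_links) := by
  unfold Pre_sort_data_links; infer_instance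

def pvWitness_sort_data_links : (List (List (String × String))) :=
  [[("name", "d0"), ("link", "http://x")],
   [("name", "a"), ("link", "s3://bucket/a")],
   [("name", "d1"), ("link", "http://y")],
   [("name", "b"), ("link", "git://repo/b")]]

def Spec_sort_data_links (data_links : List (List (String × String))) (out : List (List (String × String))) : Prop := out = sort_data_links_alt data_links
instance (data_links : List (List (String × String))) (out : List (List (String × String))) : Decidable (Spec_sort_data_links data_links out) := by unfold Spec_sort_data_links; infer_instance

-- ===== CLAIM (what is proved, stated in full; the proofs are below) =====
def Claim_equal_sort_data_links : Prop := ∀ (data_links : List (List (String × String))), Dom_sort_data_links data_links → Pre_sort_data_links data_links → Spec_sort_data_links data_links (sort_data_links data_links)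

-- ===== LEMMAS AND PROOFS =====

-- the list of closed datasets A has appended so far, as a function of the running dataset d
def pvClosed (d : List (String × String)) : List (List (String × String)) → List (List (String × String))
  | [] => []
  | l :: ls => if pvIsSep l then d :: pvClosed (pvIns [] l) ls else pvClosed (pvIns d l) ls

-- the separator positions, structurally
def pvNatSeps : List (List (String × String)) → List Nat
  | [] => []
  | l :: ls => if pvIsSep l then 0 :: (pvNatSeps ls).map (· + 1) else (pvNatSeps ls).map (· + 1)

theorem pvFoldA (ls : List (List (String × String)))
    (ds : List (List (String × String))) (d : List (String × String)) :
    (ls.foldl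
      (fun (st : List (List (String × String)) × List (String × String)) link =>
        if pvIsSep link then (st.1 ++ [st.2], pvIns [] link) else (st.1, pvIns st.2 link))
      (ds, d)).1 = ds ++ pvClosed d ls := by
  induction ls generalizing ds d with
  | nil => simp [pvClosed]
  | cons l ls ih =>
      by_cases h : pvIsSep l = true
      · simp [List.foldl_cons, h, ih, pvClosed]
      · simp [List.foldl_cons, h, ih, pvClosed]

theorem pvShift (t : List Nat) (s : Int) :
    (t.map (· + 1)).map (fun (n : Nat) => s + (n : Int)) = t.map (fun (n : Nat) => (s + 1) + (n : Int)) := by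
  induction t with
  | nil => simp
  | cons a t ih => simp only [List.map_cons, ih]; congr 1; push_cast; ring

theorem pvSeps (ls : List (List (String × String))) (s : Int) :
    ((PySem.List.enumerate ls s).filter (fun p => pvIsSep p.2)).map (·.1)
      = (pvNatSeps ls).map (fun (n : Nat) => s + (n : Int)) := by
  induction ls generalizing s with
  | nil => simp [PySem.List.enumerate_nil, pvNatSeps]
  | cons l ls ih =>
      rw [PySem.List.enumerate_cons]
      by_cases h : pvIsSep l = true
      · rw [List.filter_cons_of_pos (by simpa using h)]
        simp only [pvNatSeps, if_pos h, List.map_cons, ih, pvShift]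
        norm_num
      · rw [List.filter_cons_of_neg (by simpa using h)]
        simp only [pvNatSeps, if_neg h, ih, pvShift]

theorem pvZipShift (l : List (String × String)) (ls : List (List (String × String)))
    (j : Nat) (s : List Nat) :
    List.map (fun p => List.foldl pvIns [] (List.take (p.2 - p.1) (List.drop p.1 (l :: ls))))
        (((j + 1) :: s.map (· + 1)).zip (s.map (· + 1)))
      = List.map (fun p => List.foldl pvIns [] (List.take (p.2 - p.1) (List.drop p.1 ls)))
        ((j :: s).zip s) := by
  have hmap : ((j + 1) :: s.map (· + 1)) = (j :: s).map (· + 1) := by simp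
  rw [hmap, List.zip_map, List.map_map]
  refine List.map_congr_left ?_
  intro p _
  simp [Prod.map, Nat.add_sub_add_right]

theorem pvMain (ls : List (List (String × String))) (d : List (String × String)) :
    pvClosed d ls =
      match pvNatSeps ls with
      | [] => []
      | j :: s =>
          (ls.take j).foldl pvIns d ::
            ((j :: s).zip s).map
              (fun p => ((ls.drop p.1).take (p.2 - p.1)).foldl pvIns []) := by
  induction ls generalizing d with
  | nil => simp [pvClosed, pvNatSeps]
  | cons l ls ih =>
      by_cases h : pvIsSep l = true
      · have ih' := ih (pvIns [] l)
        rcases hs : pvNatSeps ls with _ | ⟨j, s⟩ <;> rw [hs] at ih'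
        · simp [pvClosed, pvNatSeps, h, hs, ih']
        · simp only [pvClosed, pvNatSeps, if_pos h, hs, ih', List.map_cons]
          refine List.cons_eq_cons.mpr ⟨by simp, ?_⟩
          rw [List.zip_cons_cons, List.map_cons]
          refine List.cons_eq_cons.mpr ⟨?_, (pvZipShift l ls j s).symm⟩
          simp [List.foldl_cons]
      · have ih' := ih (pvIns d l)
        rcases hs : pvNatSeps ls with _ | ⟨j, s⟩ <;> rw [hs] at ih'
        · simp [pvClosed, pvNatSeps, h, hs, ih']
        · simp only [pvClosed, pvNatSeps, if_neg h, hs, ih', List.map_cons]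
          refine List.cons_eq_cons.mpr ⟨by simp, (pvZipShift l ls j s).symm⟩

-- ===== VERDICT (by name: the statement is the Claim_ definition above) =====
theorem sort_data_links_spec : Claim_equal_sort_data_links := by
  intro dl _ _
  show sort_data_links dl = sort_data_links_alt dl
  unfold sort_data_links sort_data_links_alt pvSepIdx
  rw [pvFoldA, pvSeps]
  simp only [List.nil_append, PySem.List.slice_from_one, zero_add]
  rw [pvMain]
  rcases hs : pvNatSeps dl with _ | ⟨j, s⟩
  · simp
  · simp only [List.map_cons, List.tail_cons]
    rw [show ((j : Int) :: List.map (fun (n : Nat) => (n : Int)) s)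
          = (j :: s).map (fun (n : Nat) => (n : Int)) by simp]
    rw [List.zip_map, List.map_map]
    refine (List.map_congr_left ?_).symm
    intro p _
    simp [Prod.map, PySem.List.slice_natCast]
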